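-- pv_equiv track=rewrite | github.com/walkccc/LeetCode | solutions/2168. Unique Substrings With Equal Digit Frequency/2168.py | _isSameFreq
-- ===== SOURCE A (Python) =====
-- def _isSameFreq(counts: list[dict], i: int, j: int) -> bool:
--   count = counts[j].copy()
--   if i > 0:
--     for c, freq in counts[i - 1].items():
--       count[c] -= freq
--       if count[c] == 0:
--         del count[c]
--   return min(count.values()) == max(count.values())
-- ===== SOURCE B (Python) =====
-- def _isSameFreq(counts: list[dict], i: int, j: int) -> bool:
--   # Single short-circuit scan: the first surviving frequency difference is the
--   # candidate; every later surviving difference must equal it. No dict copy,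
--   # no mutation, no min/max over a built collection.
--   prev = counts[i - 1] if i > 0 else {}
--   f = None
--   for c, total in counts[j].items():
--     if prev.get(c) == total:
--       continue
--     d = total - prev.get(c, 0)
--     if f is None:
--       f = d
--     elif d != f:
--       return False
--   return True
-- ===== Notes on version B (the rewrite author's own statement) =====
-- stated objective: alternative
-- what changed: A copies counts[j], mutates it by subtracting counts[i-1] with deletion of zeroed keys, then compares min and max of the remaining values; B never builds that collection: it makes one short-circuiting scan over counts[j].items(), takes the first surviving difference as the candidate frequency and returns False as soon as any later surviving difference disagrees.
import Mathlib
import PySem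

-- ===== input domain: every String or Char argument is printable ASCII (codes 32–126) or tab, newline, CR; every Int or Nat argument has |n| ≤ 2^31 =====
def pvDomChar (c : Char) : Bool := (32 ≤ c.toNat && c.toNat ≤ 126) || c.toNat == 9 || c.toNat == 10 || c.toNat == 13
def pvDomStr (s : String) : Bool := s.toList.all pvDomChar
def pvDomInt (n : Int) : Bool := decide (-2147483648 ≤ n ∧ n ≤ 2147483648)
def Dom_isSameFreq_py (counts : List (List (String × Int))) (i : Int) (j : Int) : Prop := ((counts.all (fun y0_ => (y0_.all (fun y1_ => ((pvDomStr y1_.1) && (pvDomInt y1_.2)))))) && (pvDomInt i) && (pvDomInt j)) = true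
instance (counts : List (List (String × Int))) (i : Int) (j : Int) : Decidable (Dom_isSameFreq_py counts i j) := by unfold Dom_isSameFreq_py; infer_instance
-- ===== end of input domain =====

-- B replaces A's copy-subtract-delete dict and its min==max comparison by a single
-- short-circuiting scan comparing every surviving difference against the first one
-- (objective: alternative). Equivalence is about return values; neither program mutates
-- its arguments.

-- ===== PORT A =====
-- the body of the 'for c, freq in counts[i-1].items()' loop: count[c] -= freq; if count[c]==0: del count[c]
def pvStepA (d : PySem.Dict String Int) (cf : String × Int) : PySem.Dict String Int :=
  match d.get? cf.1 with
  | none => d            -- KeyError in Python; unreachable under Pre_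
  | some v => if v - cf.2 = 0 then d.erase cf.1 else d.insert cf.1 (v - cf.2)

def isSameFreq_py (counts : List (List (String × Int))) (i : Int) (j : Int) : Bool :=
  match PySem.List.pyGet? counts j with
  | none => false        -- IndexError; unreachable under Pre_
  | some lj =>
    let count0 : PySem.Dict String Int := PySem.Dict.ofList lj   -- counts[j].copy()
    let count : PySem.Dict String Int :=
      if i > 0 then
        match PySem.List.pyGet? counts (i - 1) with
        | none => count0   -- IndexError; unreachable under Pre_
        | some li => (PySem.Dict.ofList li).items.foldl pvStepA count0
      else count0
    match PySem.List.min? count.values (fun x => x), PySem.List.max? count.values (fun x => x) with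
    | some a, some b => a == b
    | _, _ => false      -- ValueError on empty; unreachable under Pre_

-- ===== PORT B =====
-- the for-loop of Source B: f is the first surviving difference (none = Python's f is None),
-- early 'return False' becomes the 'false' branch
def pvScanB (prev : PySem.Dict String Int) : List (String × Int) → Option Int → Bool
  | [], _ => true
  | (c, t) :: rest, f =>
    if prev.get? c == some t then pvScanB prev rest f
    else
      let d := t - prev.getD c 0
      match f with
      | none => pvScanB prev rest (some d)
      | some v => if d = v then pvScanB prev rest (some v) else false

def isSameFreq_py_alt (counts : List (List (String × Int))) (i : Int) (j : Int) : Bool :=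
  match (if i > 0 then PySem.List.pyGet? counts (i - 1) else some []), PySem.List.pyGet? counts j with
  | some lp, some lj => pvScanB (PySem.Dict.ofList lp) (PySem.Dict.ofList lj).items none
  | none, _ => false     -- IndexError; unreachable under Pre_
  | _, none => false     -- IndexError; unreachable under Pre_

-- ===== PRECONDITION & SPEC =====
-- Pre_ excludes exactly the inputs where A raises: an out-of-range index j (or i-1 when i>0)
-- (IndexError), a key of counts[i-1] missing from counts[j] (KeyError), and the case where the
-- subtraction empties the dict (ValueError from min() of an empty sequence).
def Pre_isSameFreq_py (counts : List (List (String × Int))) (i : Int) (j : Int) : Prop :=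
  (PySem.List.pyGet? counts j).isSome = true ∧
  (i > 0 → (PySem.List.pyGet? counts (i - 1)).isSome = true) ∧
  (let dj : PySem.Dict String Int := PySem.Dict.ofList ((PySem.List.pyGet? counts j).getD []);
   let dp : PySem.Dict String Int :=
     if i > 0 then PySem.Dict.ofList ((PySem.List.pyGet? counts (i - 1)).getD []) else PySem.Dict.empty;
   (∀ k ∈ dp.keys, dj.contains k = true) ∧ (∃ p ∈ dj.items, dp.get? p.1 ≠ some p.2))

instance (counts : List (List (String × Int))) (i : Int) (j : Int) : Decidable (Pre_isSameFreq_py counts i j) := by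
  unfold Pre_isSameFreq_py; infer_instance

def pvWitness_isSameFreq_py : (List (List (String × Int))) × Int × Int :=
  ([[("1", 1), ("2", 1)], [("1", 2), ("2", 3)]], 1, 1)

def Spec_isSameFreq_py (counts : List (List (String × Int))) (i : Int) (j : Int) (out : Bool) : Prop := out = isSameFreq_py_alt counts i j
instance (counts : List (List (String × Int))) (i : Int) (j : Int) (out : Bool) : Decidable (Spec_isSameFreq_py counts i j out) := by unfold Spec_isSameFreq_py; infer_instance

-- ===== CLAIM (what is proved, stated in full; the proofs are below) =====
def Claim_equal_isSameFreq_py : Prop := ∀ (counts : List (List (String × Int))) (i : Int) (j : Int), Dom_isSameFreq_py counts i j → Pre_isSameFreq_py counts i j → Spec_isSameFreq_py counts i j (isSameFreq_py counts i j)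

-- ===== LEMMAS AND PROOFS =====

-- a key present in items of a Nodup-keys dict determines its value
lemma value_eq_of_mem_items  (d : PySem.Dict String Int) (p : String × Int) (c : String) (v : Int)
    (hnd : d.keys.Nodup) (hp : p ∈ d.items) (hc : p.1 = c) (hv : d.get? c = some v) : p.2 = v := by
  have h1 : (p.1, p.2) ∈ d.items := by simpa using hp
  have := PySem.Dict.get?_of_mem_items d h1 hnd
  rw [hc, hv] at this
  exact (Option.some.inj this).symm

-- A's subtract-and-delete fold, characterised: its item list is counts[j]'s items with the
-- cancelling entries dropped and the prefix count subtracted from the rest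
lemma foldl_stepA_items (l : List (String × Int)) (d : PySem.Dict String Int)
    (hnd : d.keys.Nodup) (hl : (l.map Prod.fst).Nodup)
    (hsub : ∀ p ∈ l, d.contains p.1 = true) :
    (l.foldl pvStepA d).items =
      (d.items.filter (fun p => (PySem.Dict.mk l).get? p.1 != some p.2)).map
        (fun p => (p.1, p.2 - ((PySem.Dict.mk l).get? p.1).getD 0)) := by
  induction l generalizing d with
  | nil =>
    simp only [List.foldl_nil, PySem.Dict.get?, List.find?, Option.map_none]
    rw [show (List.filter (fun p => none != some p.2) d.items) = d.items from
      List.filter_eq_self.mpr (fun a _ => rfl)]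
    simp
  | cons q rest ih =>
    obtain ⟨c, f⟩ := q
    have hcont : d.contains c = true := hsub (c, f) (by simp)
    obtain ⟨v, hv⟩ : ∃ v, d.get? c = some v := by
      rw [← Option.isSome_iff_exists, ← PySem.Dict.contains_eq_isSome_get?]; exact hcont
    have hlcons : (List.map Prod.fst ((c, f) :: rest)).Nodup := hl
    rw [List.map_cons, List.nodup_cons] at hlcons
    have hcrest : c ∉ rest.map Prod.fst := hlcons.1
    have hrestnodup : (rest.map Prod.fst).Nodup := hlcons.2
    have hlookup_rest_c : (PySem.Dict.mk rest).get? c = none := by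
      simp only [PySem.Dict.get?, Option.map_eq_none_iff, List.find?_eq_none]
      intro p hp hpc
      exact hcrest (List.mem_map.mpr ⟨p, hp, by simpa using hpc⟩)
    have hget_cons : ∀ x, (PySem.Dict.mk ((c, f) :: rest)).get? x =
        if (c == x) = true then some f else (PySem.Dict.mk rest).get? x :=
      PySem.Dict.get?_mk_cons c f rest
    have huniq : ∀ p ∈ d.items, p.1 = c → p.2 = v :=
      fun p hp hpc => value_eq_of_mem_items d p c v hnd hp hpc hv
    rw [List.foldl_cons]
    by_cases hzero : v - f = 0
    · -- erase case
      have hd' : pvStepA d (c, f) = d.erase c := by simp [pvStepA, hv, hzero]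
      have heraseitems : (d.erase c).items = d.items.filter (fun p => !(p.1 == c)) := rfl
      have hnd' : (d.erase c).keys.Nodup := by
        have hs : (d.erase c).keys.Sublist d.keys := List.Sublist.map _ List.filter_sublist
        exact hs.nodup hnd
      have hsub' : ∀ p ∈ rest, (d.erase c).contains p.1 = true := by
        intro p hp
        have hne : p.1 ≠ c := fun he => hcrest (he ▸ List.mem_map.mpr ⟨p, hp, rfl⟩)
        have hmem : p.1 ∈ d.keys := (PySem.Dict.contains_iff_mem_keys d p.1).mp (hsub p (by simp [hp]))
        obtain ⟨q, hq, hq1⟩ := List.mem_map.mp hmem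
        rw [PySem.Dict.contains_iff_mem_keys]
        exact List.mem_map.mpr ⟨q, List.mem_filter.mpr ⟨hq, by simp [hq1, hne]⟩, hq1⟩
      rw [hd', ih (d.erase c) hnd' hrestnodup hsub', heraseitems, List.filter_filter]
      have hfc : d.items.filter (fun p => (PySem.Dict.mk rest).get? p.1 != some p.2 && !(p.1 == c))
          = d.items.filter (fun p => (PySem.Dict.mk ((c, f) :: rest)).get? p.1 != some p.2) := by
        apply List.filter_congr
        intro p hp
        rw [hget_cons p.1]
        by_cases hpc : p.1 = c
        · have : p.2 = v := huniq p hp hpc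
          simp [hpc, this]
          omega
        · simp [Ne.symm hpc, hpc]
      rw [hfc]
      apply List.map_congr_left
      intro p hp
      obtain ⟨hpd, hpf⟩ := List.mem_filter.mp hp
      have hpc : p.1 ≠ c := by
        intro he
        have hv2 : p.2 = v := huniq p hpd he
        rw [hget_cons p.1] at hpf
        simp [he, hv2] at hpf
        omega
      rw [hget_cons p.1, if_neg (by simp [Ne.symm hpc])]
    · -- insert case
      have hd' : pvStepA d (c, f) = d.insert c (v - f) := by simp [pvStepA, hv, hzero]
      have hnd' : (d.insert c (v - f)).keys.Nodup := by
        rw [PySem.Dict.keys_insert_of_contains d (v - f) hcont]; exact hnd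
      have hsub' : ∀ p ∈ rest, (d.insert c (v - f)).contains p.1 = true := by
        intro p hp
        rw [PySem.Dict.contains_insert]
        simp [hsub p (by simp [hp])]
      rw [hd', ih (d.insert c (v - f)) hnd' hrestnodup hsub',
        PySem.Dict.items_insert_of_contains d (v - f) hcont, List.filter_map, List.map_map]
      have hfc : d.items.filter ((fun p => (PySem.Dict.mk rest).get? p.1 != some p.2) ∘
            (fun p => if (p.1 == c) = true then (c, v - f) else p))
          = d.items.filter (fun p => (PySem.Dict.mk ((c, f) :: rest)).get? p.1 != some p.2) := by
        apply List.filter_congr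
        intro p hp
        rw [hget_cons p.1]
        by_cases hpc : p.1 = c
        · have hv2 : p.2 = v := huniq p hp hpc
          simp [Function.comp, hpc, hv2, hlookup_rest_c]
          have hfv : f ≠ v := fun h => hzero (by omega)
          simp [bne, hfv]
        · simp [Function.comp, hpc, Ne.symm hpc]
      rw [hfc]
      apply List.map_congr_left
      intro p hp
      obtain ⟨hpd, hpf⟩ := List.mem_filter.mp hp
      by_cases hpc : p.1 = c
      · have hv2 : p.2 = v := huniq p hpd hpc
        simp [Function.comp, hpc, hv2, hlookup_rest_c, hget_cons]
      · simp [Function.comp, hpc, Ne.symm hpc, hget_cons]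

-- B's scan with the candidate already fixed checks that every surviving difference equals it
lemma scanB_some (prev : PySem.Dict String Int) (items : List (String × Int)) (v : Int) :
    pvScanB prev items (some v)
      = ((items.filter (fun p => prev.get? p.1 != some p.2)).map
          (fun p => p.2 - prev.getD p.1 0)).all (fun d => d == v) := by
  induction items with
  | nil => rfl
  | cons q rest ih =>
    obtain ⟨c, t⟩ := q
    by_cases h : prev.get? c = some t
    · simp [pvScanB, h, ih]
    · have hb : (prev.get? c == some t) = false := by simp [h]
      by_cases hd : t - prev.getD c 0 = v
      · simp [pvScanB, hb, hd, ih, bne]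
      · simp [pvScanB, hb, hd, bne]

-- B's scan from the Python 'f = None' start: true iff every surviving difference
-- equals the first one
lemma scanB_none (prev : PySem.Dict String Int) (items : List (String × Int)) :
    pvScanB prev items none
      = (match (items.filter (fun p => prev.get? p.1 != some p.2)).map
            (fun p => p.2 - prev.getD p.1 0) with
         | [] => true
         | d :: rest => rest.all (fun x => x == d)) := by
  induction items with
  | nil => rfl
  | cons q rest ih =>
    obtain ⟨c, t⟩ := q
    by_cases h : prev.get? c = some t
    · simp [pvScanB, h, ih]
    · have hb : (prev.get? c == some t) = false := by simp [h]
      simp [pvScanB, hb, bne, scanB_some]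

-- min == max of a nonempty Int list says exactly: every tail element equals the head
lemma minmax_eq_allEq (d : Int) (rest : List Int) :
    (match PySem.List.min? (d :: rest) (fun x => x), PySem.List.max? (d :: rest) (fun x => x) with
     | some a, some b => a == b
     | _, _ => false) = rest.all (fun x => x == d) := by
  obtain ⟨m, hm⟩ := Option.isSome_iff_exists.mp (by
    rw [Option.isSome_iff_ne_none]; simp [PySem.List.min?_eq_none_iff] :
    (PySem.List.min? (d :: rest) (fun x => x)).isSome = true)
  obtain ⟨M, hM⟩ := Option.isSome_iff_exists.mp (by
    rw [Option.isSome_iff_ne_none]; simp [PySem.List.max?_eq_none_iff] :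
    (PySem.List.max? (d :: rest) (fun x => x)).isSome = true)
  rw [hm, hM]
  have hmin := PySem.List.min?_isMin hm
  have hmax := PySem.List.max?_isMax hM
  have hmmem : m ∈ d :: rest := PySem.List.min?_mem hm
  have hMmem : M ∈ d :: rest := PySem.List.max?_mem hM
  by_cases hall : rest.all (fun x => x == d) = true
  · have heq : ∀ x ∈ d :: rest, x = d := by
      intro x hx
      rcases List.mem_cons.mp hx with h | h
      · exact h
      · simpa using List.all_eq_true.mp hall x h
    rw [hall, heq m hmmem, heq M hMmem]
    simp
  · rw [eq_false_of_ne_true hall]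
    obtain ⟨x, hx, hxd⟩ : ∃ x ∈ rest, ¬ (x = d) := by
      simpa using hall
    have hmd : m ≤ d := hmin d (by simp)
    have hdM : d ≤ M := hmax d (by simp)
    have hmx : m ≤ x := hmin x (by simp [hx])
    have hxM : x ≤ M := hmax x (by simp [hx])
    have : m ≠ M := by
      intro he
      apply hxd
      omega
    simpa using this

-- the two programs' cores agree whenever the prefix keys are a subset of counts[j]'s and
-- at least one entry survives the subtraction
lemma core_eq (lp lj : List (String × Int))
    (hsub : ∀ k ∈ (PySem.Dict.ofList lp).keys, (PySem.Dict.ofList lj).contains k = true)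
    (hne : ∃ p ∈ (PySem.Dict.ofList lj).items, (PySem.Dict.ofList lp).get? p.1 ≠ some p.2) :
    (match PySem.List.min? ((PySem.Dict.ofList lp).items.foldl pvStepA (PySem.Dict.ofList lj)).values (fun x => x),
           PySem.List.max? ((PySem.Dict.ofList lp).items.foldl pvStepA (PySem.Dict.ofList lj)).values (fun x => x) with
     | some a, some b => a == b
     | _, _ => false)
    = pvScanB (PySem.Dict.ofList lp) (PySem.Dict.ofList lj).items none := by
  have hmk : PySem.Dict.mk (PySem.Dict.ofList lp).items = PySem.Dict.ofList lp := rfl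
  have hnd : (PySem.Dict.ofList lj).keys.Nodup := PySem.Dict.nodup_keys_ofList lj
  have hl : ((PySem.Dict.ofList lp).items.map Prod.fst).Nodup := by
    have := PySem.Dict.nodup_keys_ofList (ν := Int) lp
    simpa [PySem.Dict.keys] using this
  have hsub' : ∀ p ∈ (PySem.Dict.ofList lp).items, (PySem.Dict.ofList lj).contains p.1 = true :=
    fun p hp => hsub p.1 (PySem.Dict.mem_keys_of_mem_items _ hp)
  have hitems := foldl_stepA_items (PySem.Dict.ofList lp).items (PySem.Dict.ofList lj) hnd hl hsub'
  rw [hmk] at hitems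
  have hvals : ((PySem.Dict.ofList lp).items.foldl pvStepA (PySem.Dict.ofList lj)).values
      = ((PySem.Dict.ofList lj).items.filter (fun p => (PySem.Dict.ofList lp).get? p.1 != some p.2)).map
          (fun p => p.2 - (PySem.Dict.ofList lp).getD p.1 0) := by
    show ((PySem.Dict.ofList lp).items.foldl pvStepA (PySem.Dict.ofList lj)).items.map (fun p => p.2) = _
    rw [hitems, List.map_map]
    apply List.map_congr_left
    intro p _
    simp [PySem.Dict.getD_eq_get?_getD]
  rw [hvals, scanB_none]
  obtain ⟨p, hp, hpne⟩ := hne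
  have hVne : ((PySem.Dict.ofList lj).items.filter (fun p => (PySem.Dict.ofList lp).get? p.1 != some p.2)).map
      (fun p => p.2 - (PySem.Dict.ofList lp).getD p.1 0) ≠ [] := by
    simp only [ne_eq, List.map_eq_nil_iff, List.filter_eq_nil_iff, not_forall]
    exact ⟨p, hp, by simpa [bne] using hpne⟩
  obtain ⟨d, rest, hV⟩ := List.exists_cons_of_ne_nil hVne
  rw [hV]
  exact minmax_eq_allEq d rest

-- ===== VERDICT (by name: the statement is the Claim_ definition above) =====
theorem isSameFreq_py_spec : Claim_equal_isSameFreq_py := by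
  intro counts i j _ hpre
  obtain ⟨h1, h2, h3⟩ := hpre
  obtain ⟨lj, hlj⟩ := Option.isSome_iff_exists.mp h1
  unfold Spec_isSameFreq_py isSameFreq_py isSameFreq_py_alt
  by_cases hi : i > 0
  · obtain ⟨li, hli⟩ := Option.isSome_iff_exists.mp (h2 hi)
    simp only [hlj, hli, if_pos hi, Option.getD_some] at h3 ⊢
    exact core_eq li lj h3.1 h3.2
  · simp only [hlj, if_neg hi] at h3 ⊢
    exact core_eq [] lj
      (by intro k hk; rw [show (PySem.Dict.ofList ([] : List (String × Int))).keys = [] from rfl] at hk; cases hk)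
      h3.2
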